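-- pv_equiv track=rewrite | github.com/spiro-c/aubio-ledfx | python/lib/gen_external.py | filter_cpp_output
-- ===== SOURCE A (Python) =====
-- def filter_cpp_output(cpp_raw_output):
--     ''' prepare cpp-output for parsing '''
--     cpp_output = filter(lambda y: len(y) > 1, cpp_raw_output)
--     cpp_output = list(filter(lambda y: not y.startswith('#'), cpp_output))
--
--     i = 1
--     while 1:
--         if i >= len(cpp_output):
--             break
--         if ('{' in cpp_output[i - 1]) and ('}' not in cpp_output[i - 1]) or (';' not in cpp_output[i - 1]):
--             cpp_output[i] = cpp_output[i - 1] + ' ' + cpp_output[i]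
--             cpp_output.pop(i - 1)
--         elif ('}' in cpp_output[i]):
--             cpp_output[i] = cpp_output[i - 1] + ' ' + cpp_output[i]
--             cpp_output.pop(i - 1)
--         else:
--             i += 1
--
--     # clean pointer notations
--     tmp = []
--     for l in cpp_output:
--         tmp += [l.replace(' *', ' * ')]
--     cpp_output = tmp
--
--     return cpp_output
-- ===== SOURCE B (Python) =====
-- def filter_cpp_output(cpp_raw_output):
--     ''' prepare cpp-output for parsing '''
--     groups = []   # each group: list of line fragments to be joined with ' '
--     flags = []    # per group: (has '{', has '}', has ';')
--     for line in cpp_raw_output: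
--         if len(line) <= 1 or line.startswith('#'):
--             continue
--         o, c, s = '{' in line, '}' in line, ';' in line
--         if groups and ((flags[-1][0] and not flags[-1][1]) or not flags[-1][2] or c):
--             groups[-1].append(line)
--             fo, fc, fs = flags[-1]
--             flags[-1] = (fo or o, fc or c, fs or s)
--         else:
--             groups.append([line])
--             flags.append((o, c, s))
--     return [' '.join(g).replace(' *', ' * ') for g in groups]
-- ===== Notes on version B (the rewrite author's own statement) =====
-- stated objective: faster
-- what changed: Replaced A's index-pointer while-loop that repeatedly merges via string concatenation and cpp_output.pop(i-1) (each pop shifts the tail, each merge rescans/rebuilds the growing string) with a single forward pass that groups lines as fragment lists with cached '{'/'}'/';' membership flags and joins each group once at the end.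
import Mathlib
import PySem

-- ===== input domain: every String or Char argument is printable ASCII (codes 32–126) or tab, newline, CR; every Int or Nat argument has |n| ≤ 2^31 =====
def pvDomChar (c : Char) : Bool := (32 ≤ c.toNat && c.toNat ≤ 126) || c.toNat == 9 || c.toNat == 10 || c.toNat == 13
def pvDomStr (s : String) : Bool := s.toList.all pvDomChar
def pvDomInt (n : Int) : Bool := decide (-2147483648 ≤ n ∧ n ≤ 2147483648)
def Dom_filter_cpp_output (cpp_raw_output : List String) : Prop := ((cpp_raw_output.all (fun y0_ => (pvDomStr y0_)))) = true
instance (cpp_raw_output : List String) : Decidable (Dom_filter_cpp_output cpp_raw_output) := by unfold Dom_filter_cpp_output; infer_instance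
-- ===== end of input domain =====

-- B makes one forward pass, keeping each output line as a list of fragments with cached '{'/'}'/';' flags and joining once at the end, instead of A's pointer loop with repeated pop(i-1); same return value.

-- ===== PORT A =====
-- A's while-loop: list l, pointer i (always ≥ 1, passed as a proof for termination only);
-- 'cpp_output[i] = prev + ' ' + cur; cpp_output.pop(i-1)' is the take/cons/drop rewrite below (exact for 1 ≤ i < len).
def mergeLoopA (fuel : Nat) (l : List String) (i : Nat) : List String :=
  match fuel with
  | 0 => l
  | fuel + 1 =>
    if l.length ≤ i then l
    else
      let prev := l.getD (i - 1) ""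
      let cur := l.getD i ""
      if ((PySem.Str.isIn "{" prev) && !(PySem.Str.isIn "}" prev)) || !(PySem.Str.isIn ";" prev) then
        mergeLoopA fuel (l.take (i - 1) ++ (prev ++ " " ++ cur) :: l.drop (i + 1)) i
      else if PySem.Str.isIn "}" cur then
        mergeLoopA fuel (l.take (i - 1) ++ (prev ++ " " ++ cur) :: l.drop (i + 1)) i
      else
        mergeLoopA fuel l (i + 1)

def filter_cpp_output (cpp_raw_output : List String) : List String :=
  let cpp_output1 := cpp_raw_output.filter (fun y => decide (PySem.Str.len y > 1))
  let cpp_output2 := cpp_output1.filter (fun y => !(PySem.Str.startswith y "#"))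
  let merged := mergeLoopA cpp_output2.length cpp_output2 1
  merged.map (fun l => PySem.Str.replace l " *" " * ")

-- ===== PORT B =====
-- one pass; 'groups' holds each output line as its list of fragments (state kept head-first,
-- head = python's groups[-1]/flags[-1]), 'flags' caches ('{' in group, '}' in group, ';' in group)
def pushGroup (st : List (List String) × List (Bool × Bool × Bool)) (line : String) :
    List (List String) × List (Bool × Bool × Bool) :=
  if PySem.Str.len line ≤ 1 || PySem.Str.startswith line "#" then st
  else
    let o := PySem.Str.isIn "{" line
    let c := PySem.Str.isIn "}" line
    let s := PySem.Str.isIn ";" line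
    match st with
    | (g :: gs, (fo, fc, fs) :: fl) =>
      if (fo && !fc) || !fs || c then
        ((g ++ [line]) :: gs, (fo || o, fc || c, fs || s) :: fl)
      else
        ([line] :: g :: gs, (o, c, s) :: (fo, fc, fs) :: fl)
    | _ => ([[line]], [(o, c, s)])

def filter_cpp_output_alt (cpp_raw_output : List String) : List String :=
  let st := cpp_raw_output.foldl pushGroup ([], [])
  (st.1.reverse).map (fun g => PySem.Str.replace (PySem.Str.join " " g) " *" " * ")

-- ===== PRECONDITION & SPEC =====
def Spec_filter_cpp_output (cpp_raw_output : List String) (out : List String) : Prop := out = filter_cpp_output_alt cpp_raw_output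
instance (cpp_raw_output : List String) (out : List String) : Decidable (Spec_filter_cpp_output cpp_raw_output out) := by unfold Spec_filter_cpp_output; infer_instance

-- ===== CLAIM (what is proved, stated in full; the proofs are below) =====
def Claim_equal_filter_cpp_output : Prop := ∀ (cpp_raw_output : List String), Dom_filter_cpp_output cpp_raw_output → Spec_filter_cpp_output cpp_raw_output (filter_cpp_output cpp_raw_output)

-- ===== LEMMAS AND PROOFS =====

-- proof-side bridge: old-style single-string buffer fold (the common form both ports are proved equal to)
def mergeKeep (acc : List String) (line : String) : List String :=
  match acc with
  | [] => [line]
  | t :: ts =>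
    if ((PySem.Str.isIn "{" t) && !(PySem.Str.isIn "}" t)) || !(PySem.Str.isIn ";" t)
        || (PySem.Str.isIn "}" line) then
      (t ++ " " ++ line) :: ts
    else
      line :: t :: ts

def pushLine (acc : List String) (line : String) : List String :=
  if PySem.Str.len line ≤ 1 || PySem.Str.startswith line "#" then acc
  else mergeKeep acc line

def pvJ (g : List String) : String := PySem.Str.join " " g

def pvFlag (g : List String) : Bool × Bool × Bool :=
  (PySem.Str.isIn "{" (pvJ g), PySem.Str.isIn "}" (pvJ g), PySem.Str.isIn ";" (pvJ g))

-- the fused pass over the raw list equals the plain merge fold over the doubly-filtered list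
lemma foldl_pushLine_eq (xs : List String) (acc : List String) :
    xs.foldl pushLine acc
      = ((xs.filter (fun y => decide (PySem.Str.len y > 1))).filter
          (fun y => !(PySem.Str.startswith y "#"))).foldl mergeKeep acc := by
  induction xs generalizing acc with
  | nil => rfl
  | cons x xs ih =>
    simp only [List.foldl_cons, List.filter_cons, pushLine]
    by_cases h1 : PySem.Str.len x ≤ 1
    · rw [if_pos (by simp only [Bool.or_eq_true, decide_eq_true_eq]; exact Or.inl h1), if_neg (by simp only [decide_eq_true_eq]; omega), ih]
    · cases h2 : PySem.Str.startswith x "#" with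
      | true =>
        rw [if_pos (by simp), if_pos (by simp only [decide_eq_true_eq]; omega),
          List.filter_cons, if_neg (by rw [h2]; simp), ih]
      | false =>
        rw [if_neg (by simp only [Bool.or_false, decide_eq_true_eq]; omega),
          if_pos (by simp only [decide_eq_true_eq]; omega),
          List.filter_cons, if_pos (by rw [h2]; rfl), List.foldl_cons, ih]

lemma getD_append_len (u : List String) (t : String) (r : List String) (d : String) :
    (u ++ t :: r).getD u.length d = t := by
  induction u with
  | nil => rfl
  | cons a u ih => simpa using ih

-- A's pointer loop, run on a reversed buffer 'acc' (positions 0..i-1, i = acc.length)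
-- followed by the unprocessed suffix 'rest', computes the single-string-buffer fold.
lemma mergeLoopA_eq_foldl (rest : List String) :
    ∀ (acc l : List String) (i fuel : Nat),
      l = acc.reverse ++ rest → i = acc.length → 0 < i → rest.length < fuel →
      mergeLoopA fuel l i = (rest.foldl mergeKeep acc).reverse := by
  induction rest with
  | nil =>
    intro acc l i fuel hl hik hi hf
    subst hl; subst hik
    cases fuel with
    | zero => rw [mergeLoopA]; simp
    | succ f => rw [mergeLoopA]; simp
  | cons x rest ih =>
    intro acc l i fuel hl hik hi hf
    subst hl; subst hik
    cases fuel with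
    | zero => omega
    | succ f =>
      cases acc with
      | nil => simp at hi
      | cons t ts =>
        have hprev : ((t :: ts).reverse ++ x :: rest).getD (ts.length + 1 - 1) "" = t := by
          have := getD_append_len ts.reverse t (x :: rest) ""
          simpa using this
        have hcur : ((t :: ts).reverse ++ x :: rest).getD (ts.length + 1) "" = x := by
          have := getD_append_len (ts.reverse ++ [t]) x rest ""
          simpa [List.append_assoc] using this
        have htake : ((t :: ts).reverse ++ x :: rest).take (ts.length + 1 - 1) = ts.reverse := by
          have : ((ts.reverse ++ [t]) ++ x :: rest).take ts.reverse.length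
              = (ts.reverse).take ts.reverse.length := by
            rw [List.append_assoc, List.take_append_of_le_length (by simp)]
          simpa using this
        have hdrop : ((t :: ts).reverse ++ x :: rest).drop (ts.length + 1 + 1) = rest := by
          have h0 : List.drop ((ts.reverse ++ [t]) ++ [x]).length (((ts.reverse ++ [t]) ++ [x]) ++ rest) = rest :=
            List.drop_left ..
          simpa [List.append_assoc] using h0
        rw [mergeLoopA]
        rw [if_neg (by simp)]
        simp only [List.length_cons, hprev, hcur, htake, hdrop]
        cases c1 : ((PySem.Str.isIn "{" t) && !(PySem.Str.isIn "}" t)) || !(PySem.Str.isIn ";" t) with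
        | true =>
          rw [if_pos rfl]
          rw [ih ((t ++ " " ++ x) :: ts) _ _ _ (by simp) (by simp) (by simp) (by simp at hf ⊢; omega)]
          simp only [List.foldl_cons]
          have hm : mergeKeep (t :: ts) x = (t ++ " " ++ x) :: ts := by
            simp only [mergeKeep]
            rw [if_pos (by rw [c1]; simp)]
          rw [hm]
        | false =>
          rw [if_neg (by simp)]
          cases c2 : PySem.Str.isIn "}" x with
          | true =>
            rw [if_pos rfl]
            rw [ih ((t ++ " " ++ x) :: ts) _ _ _ (by simp) (by simp) (by simp) (by simp at hf ⊢; omega)]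
            simp only [List.foldl_cons]
            have hm : mergeKeep (t :: ts) x = (t ++ " " ++ x) :: ts := by
              simp only [mergeKeep]
              rw [if_pos (by rw [c1, c2]; simp)]
            rw [hm]
          | false =>
            rw [if_neg (by simp)]
            rw [ih (x :: t :: ts) _ _ _ (by simp) (by simp) (by simp) (by simp at hf ⊢; omega)]
            simp only [List.foldl_cons]
            have hm : mergeKeep (t :: ts) x = x :: t :: ts := by
              simp only [mergeKeep]
              rw [if_neg (by rw [c1, c2]; simp)]
            rw [hm]

-- A's loop started at i = 1 with fuel = length is the fold over the whole (filtered) list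
lemma mergeLoopA_one (l : List String) :
    mergeLoopA l.length l 1 = (l.foldl mergeKeep []).reverse := by
  cases l with
  | nil => rfl
  | cons y r =>
    simp only [List.length_cons]
    rw [mergeLoopA_eq_foldl r [y] (y :: r) 1 (r.length + 1) (by simp) (by simp) (by omega) (by omega)]
    simp [mergeKeep]

-- ===== B-side lemmas: the fragment-list state projects onto the single-string fold =====

lemma isIn_single (c : Char) (l : List Char) : PySem.Chars.isIn [c] l = decide (c ∈ l) := by
  by_cases hm : c ∈ l
  · simp only [hm, decide_true]
    exact (PySem.Chars.isIn_iff_infix [c] l).mpr ((List.singleton_infix_iff c l).mpr hm)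
  · simp only [hm, decide_false]
    rw [← Bool.not_eq_true]
    intro h
    exact hm ((List.singleton_infix_iff c l).mp ((PySem.Chars.isIn_iff_infix [c] l).mp h))

lemma isIn_single_append (n : String) (c : Char) (hn : n.toList = [c]) (a b : String) :
    PySem.Str.isIn n (a ++ b) = (PySem.Str.isIn n a || PySem.Str.isIn n b) := by
  simp only [PySem.Str.isIn_eq, String.toList_append, hn, isIn_single]
  simp [List.mem_append]

lemma pvJ_singleton (x : String) : pvJ [x] = x := by
  rw [← String.toList_inj]
  simp [pvJ, PySem.Str.toList_join, PySem.Chars.join_singleton]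

lemma pvJ_snoc (g : List String) (hg : g ≠ []) (x : String) :
    pvJ (g ++ [x]) = pvJ g ++ " " ++ x := by
  rw [← String.toList_inj]
  induction g with
  | nil => exact absurd rfl hg
  | cons a g ih =>
    cases g with
    | nil =>
      simp [pvJ, PySem.Str.toList_join, PySem.Chars.join_cons_cons, PySem.Chars.join_singleton]
    | cons b g =>
      have hthis := ih (by simp)
      have hsp : (" " : String).toList = [' '] := rfl
      simp only [pvJ, PySem.Str.toList_join, List.map_cons, List.map_append, List.map_nil,
        List.cons_append, PySem.Chars.join_cons_cons, String.toList_append, hsp] at hthis ⊢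
      simpa [List.append_assoc] using hthis

lemma isIn_pvJ_snoc (n : String) (c : Char) (hn : n.toList = [c]) (hc : c ≠ ' ')
    (g : List String) (hg : g ≠ []) (x : String) :
    PySem.Str.isIn n (pvJ (g ++ [x])) = (PySem.Str.isIn n (pvJ g) || PySem.Str.isIn n x) := by
  rw [pvJ_snoc g hg x, isIn_single_append n c hn, isIn_single_append n c hn]
  have hsp : PySem.Str.isIn n " " = false := by
    simp only [PySem.Str.isIn_eq, hn, isIn_single]
    simpa using hc
  rw [hsp]
  simp [Bool.or_assoc]

-- the invariant: the fragment/flag state is (groups, groups.map pvFlag) with nonempty groups,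
-- and joining each group gives exactly the single-string fold
lemma foldl_pushGroup_inv (xs : List String) :
    ∀ (gs : List (List String)), (∀ g ∈ gs, g ≠ []) →
      ∃ gs2, xs.foldl pushGroup (gs, gs.map pvFlag) = (gs2, gs2.map pvFlag)
        ∧ (∀ g ∈ gs2, g ≠ []) ∧ gs2.map pvJ = xs.foldl pushLine (gs.map pvJ) := by
  induction xs with
  | nil => exact fun gs h => ⟨gs, rfl, h, rfl⟩
  | cons x xs ih =>
    intro gs h
    simp only [List.foldl_cons]
    by_cases hskip : (decide (PySem.Str.len x ≤ 1) || PySem.Str.startswith x "#") = true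
    · rw [show pushGroup (gs, gs.map pvFlag) x = (gs, gs.map pvFlag) from by
          simp only [pushGroup]; rw [if_pos hskip],
        show pushLine (gs.map pvJ) x = gs.map pvJ from by
          simp only [pushLine]; rw [if_pos hskip]]
      exact ih gs h
    · cases gs with
      | nil =>
        rw [show pushGroup ([], ([] : List (List String)).map pvFlag) x
              = ([[x]], [[x]].map pvFlag) from by
            simp only [pushGroup, List.map_nil]
            rw [if_neg hskip]
            simp [pvFlag, pvJ_singleton],
          show pushLine (([] : List (List String)).map pvJ) x = [[x]].map pvJ from by
            simp only [pushLine, List.map_nil]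
            rw [if_neg hskip]
            simp [mergeKeep, pvJ_singleton]]
        exact ih [[x]] (by simp)
      | cons g gs' =>
        have hg : g ≠ [] := h g (by simp)
        have hmem : ∀ g' ∈ gs', g' ≠ [] := fun g' hm => h g' (List.mem_cons_of_mem _ hm)
        cases hcond : ((PySem.Str.isIn "{" (pvJ g)) && !(PySem.Str.isIn "}" (pvJ g)))
            || !(PySem.Str.isIn ";" (pvJ g)) || PySem.Str.isIn "}" x with
        | true =>
          rw [show pushGroup (g :: gs', (g :: gs').map pvFlag) x
                = ((g ++ [x]) :: gs', ((g ++ [x]) :: gs').map pvFlag) from by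
              simp only [pushGroup, List.map_cons, pvFlag]
              rw [if_neg hskip, if_pos hcond]
              rw [isIn_pvJ_snoc "{" '{' rfl (by decide) g hg,
                isIn_pvJ_snoc "}" '}' rfl (by decide) g hg,
                isIn_pvJ_snoc ";" ';' rfl (by decide) g hg],
            show pushLine ((g :: gs').map pvJ) x = ((g ++ [x]) :: gs').map pvJ from by
              simp only [pushLine, List.map_cons, mergeKeep]
              rw [if_neg hskip, if_pos hcond, pvJ_snoc g hg x]]
          exact ih ((g ++ [x]) :: gs')
            (fun g' hm => by
              rcases List.mem_cons.mp hm with rfl | hm'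
              · simp
              · exact hmem g' hm')
        | false =>
          rw [show pushGroup (g :: gs', (g :: gs').map pvFlag) x
                = ([x] :: g :: gs', ([x] :: g :: gs').map pvFlag) from by
              simp only [pushGroup, List.map_cons, pvFlag]
              rw [if_neg hskip, if_neg (by rw [hcond]; simp)]
              simp [pvFlag, pvJ_singleton],
            show pushLine ((g :: gs').map pvJ) x = ([x] :: g :: gs').map pvJ from by
              simp only [pushLine, List.map_cons, mergeKeep]
              rw [if_neg hskip, if_neg (by rw [hcond]; simp), pvJ_singleton]]
          exact ih ([x] :: g :: gs')
            (fun g' hm => by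
              rcases List.mem_cons.mp hm with rfl | hm'
              · simp
              · rcases List.mem_cons.mp hm' with rfl | hm''
                · exact hg
                · exact hmem g' hm'')

theorem filter_cpp_output_spec : Claim_equal_filter_cpp_output := by
  intro xs _
  unfold Spec_filter_cpp_output filter_cpp_output filter_cpp_output_alt
  dsimp only
  obtain ⟨gs2, hst, hne, hmap⟩ := foldl_pushGroup_inv xs [] (by simp)
  rw [mergeLoopA_one, ← foldl_pushLine_eq]
  simp only [List.map_nil] at hst hmap
  rw [hst, ← hmap]
  simp [List.map_map, List.map_reverse, pvJ, Function.comp]
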